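-- pv_equiv track=rewrite | github.com/0xminion/chain-monitor | scripts/run_twitter_standalone.py | _build_digest
-- ===== SOURCE A (Python) =====
-- def _build_digest(tweets: list[dict]) -> str:
--     """Build plain-text digest from raw tweets."""
--     lines = ["# Twitter Summary — Standalone Collection", ""]
--     by_chain = {}
--     for t in tweets:
--         by_chain.setdefault(t.get("chain", "unknown"), []).append(t)
--     for chain, c_tweets in sorted(by_chain.items()):
--         lines.append(f"\n## {chain}")
--         for tw in c_tweets[:7]:
--             handle = tw.get("account_handle", "")
--             role = tw.get("account_role", "")
--             text = tw.get("text", "")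
--             url = tw.get("url", "")
--             ts = tw.get("timestamp", "")[:16].replace("T", " ")
--             badges = []
--             if tw.get("is_retweet"):
--                 badges.append("🔁")
--             if tw.get("is_quote_tweet"):
--                 badges.append("💬")
--             badge_str = f" [{' '.join(badges)}]" if badges else ""
--             display_text = text.replace("@", "").replace("https://", "").replace("http://", "")
--             lines.append(f"- **@{handle}** ({role}){badge_str} — [{ts}]({url})")
--             lines.append(f"  > {display_text[:220]}{'...' if len(display_text) > 220 else ''}")
--     return "\n".join(lines)
-- ===== SOURCE B (Python) =====
-- def _fmt(tw):
--     """Format one tweet as its two digest lines."""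
--     badges = " ".join(
--         b for k, b in (("is_retweet", "\U0001F501"), ("is_quote_tweet", "\U0001F4AC"))
--         if tw.get(k)
--     )
--     badge_str = f" [{badges}]" if badges else ""
--     ts = tw.get("timestamp", "")[:16].replace("T", " ")
--     body = tw.get("text", "")
--     for junk in ("@", "https://", "http://"):
--         body = body.replace(junk, "")
--     tail = "..." if len(body) > 220 else ""
--     return [
--         f"- **@{tw.get('account_handle', '')}** ({tw.get('account_role', '')}){badge_str}"
--         f" — [{ts}]({tw.get('url', '')})",
--         f"  > {body[:220]}{tail}",
--     ]
--
--
-- def _build_digest(tweets: list[dict]) -> str: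
--     """Build plain-text digest from raw tweets."""
--
--     def chain_of(t):
--         return t.get("chain", "unknown")
--
--     parts = ["# Twitter Summary — Standalone Collection", ""]
--     for chain in sorted({chain_of(t) for t in tweets}):
--         parts.append(f"\n## {chain}")
--         for tw in [t for t in tweets if chain_of(t) == chain][:7]:
--             parts.extend(_fmt(tw))
--     return "\n".join(parts)
-- ===== Notes on version B (the rewrite author's own statement) =====
-- stated objective: idiomatic
-- what changed: B drops the setdefault-dict grouping and sorted(items): it sorts the set of distinct chain names once and emits each chain's block by filtering the tweet list, with the per-tweet formatting factored into a helper that builds the badge string by a join over a filtered pair table instead of conditional appends.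
import Mathlib
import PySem

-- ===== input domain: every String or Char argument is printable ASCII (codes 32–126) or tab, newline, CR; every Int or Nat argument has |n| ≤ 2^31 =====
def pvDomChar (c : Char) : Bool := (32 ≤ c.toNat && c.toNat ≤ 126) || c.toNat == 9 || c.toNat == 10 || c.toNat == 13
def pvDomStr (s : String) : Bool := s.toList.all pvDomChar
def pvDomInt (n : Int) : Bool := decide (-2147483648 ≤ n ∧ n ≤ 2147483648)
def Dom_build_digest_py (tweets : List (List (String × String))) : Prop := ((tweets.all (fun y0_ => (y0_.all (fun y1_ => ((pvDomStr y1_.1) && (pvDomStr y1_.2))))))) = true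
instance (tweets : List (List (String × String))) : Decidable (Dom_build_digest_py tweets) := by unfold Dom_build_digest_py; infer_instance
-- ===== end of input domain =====

-- B is an idiomatic re-decomposition (sorted distinct chains + per-chain filter, formatting helper)
-- of A's setdefault-dict grouping; return values proved equal on all inputs.

-- Python truthiness of `d.get(k)` (None or a string): true iff present and non-empty.
def pyTruthy (o : Option String) : Bool := o.getD "" != ""

-- ===== PORT A =====
def build_digest_py (tweets : List (List (String × String))) : String :=
  let lines0 : List String := ["# Twitter Summary — Standalone Collection", ""]
  let by_chain : PySem.Dict String (List (List (String × String))) :=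
    -- by_chain.setdefault(t.get("chain","unknown"), []).append(t)
    tweets.foldl (fun d t => d.modify (PySem.Dict.getD ⟨t⟩ "chain" "unknown") [] (fun v => v ++ [t]))
      PySem.Dict.empty
  -- sorted(by_chain.items()): dict keys are distinct, so Python's tuple comparison only ever
  -- reads the first components; exact as a key-sort on the chain name.
  let sortedItems := PySem.List.sorted by_chain.items (fun p => p.1) false
  let lines := sortedItems.foldl (fun ls p =>
    let ls := ls ++ ["\n## " ++ p.1]
    (PySem.List.slice p.2 none (some 7)).foldl (fun ls tw =>
      let handle := PySem.Dict.getD ⟨tw⟩ "account_handle" ""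
      let role := PySem.Dict.getD ⟨tw⟩ "account_role" ""
      let text := PySem.Dict.getD ⟨tw⟩ "text" ""
      let url := PySem.Dict.getD ⟨tw⟩ "url" ""
      let ts := PySem.Str.replace (PySem.Str.slice (PySem.Dict.getD ⟨tw⟩ "timestamp" "") none (some 16)) "T" " "
      let badges : List String := []
      let badges := if pyTruthy (PySem.Dict.get? ⟨tw⟩ "is_retweet") then badges ++ ["🔁"] else badges
      let badges := if pyTruthy (PySem.Dict.get? ⟨tw⟩ "is_quote_tweet") then badges ++ ["💬"] else badges
      let badge_str := if badges ≠ [] then " [" ++ PySem.Str.join " " badges ++ "]" else ""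
      let display := PySem.Str.replace (PySem.Str.replace (PySem.Str.replace text "@" "") "https://" "") "http://" ""
      let ls := ls ++ ["- **@" ++ handle ++ "** (" ++ role ++ ")" ++ badge_str ++ " — [" ++ ts ++ "](" ++ url ++ ")"]
      ls ++ ["  > " ++ PySem.Str.slice display none (some 220) ++ (if PySem.Str.len display > 220 then "..." else "")])
      ls) lines0
  PySem.Str.join "\n" lines

-- ===== PORT B =====
def chainOf (t : List (String × String)) : String := PySem.Dict.getD ⟨t⟩ "chain" "unknown"

def fmtTweet (tw : List (String × String)) : List String :=
  let badges := PySem.Str.join " "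
    (([(("is_retweet" : String), ("🔁" : String)), ("is_quote_tweet", "💬")].filter
        (fun p => pyTruthy (PySem.Dict.get? ⟨tw⟩ p.1))).map (fun p => p.2))
  let badge_str := if badges ≠ "" then " [" ++ badges ++ "]" else ""
  let ts := PySem.Str.replace (PySem.Str.slice (PySem.Dict.getD ⟨tw⟩ "timestamp" "") none (some 16)) "T" " "
  let body := ["@", "https://", "http://"].foldl (fun s j => PySem.Str.replace s j "")
    (PySem.Dict.getD ⟨tw⟩ "text" "")
  let tail := if PySem.Str.len body > 220 then "..." else ""
  ["- **@" ++ PySem.Dict.getD ⟨tw⟩ "account_handle" "" ++ "** (" ++ PySem.Dict.getD ⟨tw⟩ "account_role" "" ++ ")"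
     ++ badge_str ++ " — [" ++ ts ++ "](" ++ PySem.Dict.getD ⟨tw⟩ "url" "" ++ ")",
   "  > " ++ PySem.Str.slice body none (some 220) ++ tail]

def build_digest_py_alt (tweets : List (List (String × String))) : String :=
  let chains := PySem.List.sorted (PySem.Set.ofList (tweets.map chainOf)) (fun c => c) false
  let parts := chains.foldl (fun ps c =>
      (PySem.List.slice (tweets.filter (fun t => chainOf t == c)) none (some 7)).foldl
        (fun ps tw => ps ++ fmtTweet tw) (ps ++ ["\n## " ++ c]))
    ["# Twitter Summary — Standalone Collection", ""]
  PySem.Str.join "\n" parts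

-- ===== PRECONDITION & SPEC =====
def Spec_build_digest_py (tweets : List (List (String × String))) (out : String) : Prop := out = build_digest_py_alt tweets
instance (tweets : List (List (String × String))) (out : String) : Decidable (Spec_build_digest_py tweets out) := by unfold Spec_build_digest_py; infer_instance

-- ===== CLAIM (what is proved, stated in full; the proofs are below) =====
def Claim_equal_build_digest_py : Prop := ∀ (tweets : List (List (String × String))), Dom_build_digest_py tweets → Spec_build_digest_py tweets (build_digest_py tweets)

-- ===== LEMMAS AND PROOFS =====

abbrev Tw := List (String × String)

def grp (tweets : List Tw) : PySem.Dict String (List Tw) :=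
  tweets.foldl (fun d t => d.modify (chainOf t) [] (fun v => v ++ [t])) PySem.Dict.empty

theorem keys_grp (tweets : List Tw) :
    (grp tweets).keys = PySem.Set.ofList (tweets.map chainOf) := by
  have h := PySem.Dict.keys_foldl_modify_key tweets chainOf ([] : List Tw)
      (fun _ t => (fun v => v ++ [t])) PySem.Dict.empty
  simpa [grp] using h

theorem nodup_keys_grp (tweets : List Tw) : (grp tweets).keys.Nodup := by
  have h := PySem.Dict.nodup_keys_foldl_modify_key tweets chainOf ([] : List Tw)
      (fun _ t => (fun v => v ++ [t])) PySem.Dict.empty (by simp [PySem.Dict.empty, PySem.Dict.keys])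
  simpa [grp] using h

theorem getD_grp (tweets : List Tw) (c : String) :
    (grp tweets).getD c [] = tweets.filter (fun t => chainOf t == c) := by
  have hm : grp tweets = ((tweets.map (fun t => (chainOf t, t))).foldl
      (fun d p => d.modify p.1 [] (fun v => v ++ [p.2])) PySem.Dict.empty) := by
    rw [List.foldl_map]
    rfl
  rw [hm, PySem.Dict.getD_foldl_modify_append]
  simp only [List.filter_map, List.map_map]
  simp [Function.comp_def]

theorem items_grp (tweets : List Tw) :
    (grp tweets).items = (PySem.Set.ofList (tweets.map chainOf)).map
      (fun c => (c, tweets.filter (fun t => chainOf t == c))) := by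
  rw [PySem.Dict.items_eq_map_keys (grp tweets) (nodup_keys_grp tweets) []]
  rw [keys_grp]
  apply List.map_congr_left
  intro c _
  rw [getD_grp]

theorem sortedItems_grp (tweets : List Tw) :
    PySem.List.sorted (grp tweets).items (fun p => p.1) false
      = (PySem.List.sorted (PySem.Set.ofList (tweets.map chainOf)) (fun c => c) false).map
          (fun c => (c, tweets.filter (fun t => chainOf t == c))) := by
  apply PySem.List.sorted_eq_of_perm_of_pairwise_lt
  · rw [items_grp]
    exact (PySem.List.sorted_perm _ _ _).map _
  · rw [List.pairwise_map]
    simpa using PySem.List.sorted_ofList_pairwise_lt (tweets.map chainOf)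

theorem badge_eq (tw : Tw) :
    (if (PySem.Str.join " "
        (([(("is_retweet" : String), ("🔁" : String)), ("is_quote_tweet", "💬")].filter
            (fun p => pyTruthy (PySem.Dict.get? ⟨tw⟩ p.1))).map (fun p => p.2))) ≠ "" then
       " [" ++ (PySem.Str.join " "
        (([(("is_retweet" : String), ("🔁" : String)), ("is_quote_tweet", "💬")].filter
            (fun p => pyTruthy (PySem.Dict.get? ⟨tw⟩ p.1))).map (fun p => p.2))) ++ "]"
     else "")
    = (let badges : List String := []
       let badges := if pyTruthy (PySem.Dict.get? ⟨tw⟩ "is_retweet") then badges ++ ["🔁"] else badges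
       let badges := if pyTruthy (PySem.Dict.get? ⟨tw⟩ "is_quote_tweet") then badges ++ ["💬"] else badges
       if badges ≠ [] then " [" ++ PySem.Str.join " " badges ++ "]" else "") := by
  cases h1 : pyTruthy (PySem.Dict.get? ⟨tw⟩ "is_retweet") <;>
    cases h2 : pyTruthy (PySem.Dict.get? ⟨tw⟩ "is_quote_tweet") <;>
      simp only [List.filter, h1, h2] <;> decide

-- the per-tweet body of A's inner loop appends exactly fmtTweet tw
theorem inner_eq (ls : List String) (tw : Tw) :
    (let handle := PySem.Dict.getD ⟨tw⟩ "account_handle" ""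
     let role := PySem.Dict.getD ⟨tw⟩ "account_role" ""
     let text := PySem.Dict.getD ⟨tw⟩ "text" ""
     let url := PySem.Dict.getD ⟨tw⟩ "url" ""
     let ts := PySem.Str.replace (PySem.Str.slice (PySem.Dict.getD ⟨tw⟩ "timestamp" "") none (some 16)) "T" " "
     let badges : List String := []
     let badges := if pyTruthy (PySem.Dict.get? ⟨tw⟩ "is_retweet") then badges ++ ["🔁"] else badges
     let badges := if pyTruthy (PySem.Dict.get? ⟨tw⟩ "is_quote_tweet") then badges ++ ["💬"] else badges
     let badge_str := if badges ≠ [] then " [" ++ PySem.Str.join " " badges ++ "]" else ""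
     let display := PySem.Str.replace (PySem.Str.replace (PySem.Str.replace text "@" "") "https://" "") "http://" ""
     let ls := ls ++ ["- **@" ++ handle ++ "** (" ++ role ++ ")" ++ badge_str ++ " — [" ++ ts ++ "](" ++ url ++ ")"]
     ls ++ ["  > " ++ PySem.Str.slice display none (some 220) ++ (if PySem.Str.len display > 220 then "..." else "")])
    = ls ++ fmtTweet tw := by
  simp only [fmtTweet, List.foldl]
  rw [← badge_eq tw]
  simp

theorem main_eq (tweets : List Tw) : build_digest_py tweets = build_digest_py_alt tweets := by
  simp only [build_digest_py, build_digest_py_alt]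
  rw [show (tweets.foldl (fun d t =>
        d.modify (PySem.Dict.getD ⟨t⟩ "chain" "unknown") [] (fun v => v ++ [t]))
        PySem.Dict.empty) = grp tweets from rfl]
  rw [sortedItems_grp, List.foldl_map]
  apply congrArg
  apply PySem.List.foldl_congr_mem
  intro acc c _
  apply PySem.List.foldl_congr_mem
  intro acc2 tw _
  exact inner_eq acc2 tw

-- ===== VERDICT (by name: the statement is the Claim_ definition above) =====
theorem build_digest_py_spec : Claim_equal_build_digest_py := by
  intro tweets _
  unfold Spec_build_digest_py
  exact main_eq tweets
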